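-- pv_equiv track=rewrite | github.com/DayanAguilar/practica-1 | utils.py | move_northeast
-- ===== SOURCE A (Python) =====
-- def move_northeast(new_board, row_copy, col_copy, previous_position, player):
--     for n in range(1, min(row_copy + 1, 4 - col_copy) + 1):
--         if row_copy - n >= 0 and col_copy + n < 4:
--             if new_board[row_copy - n][col_copy + n] is not None:
--                 break
--             new_board[row_copy - n][col_copy + n] = player
--             new_board[previous_position[0]][previous_position[1]] = None
--             previous_position = [row_copy - n, col_copy + n]
--     return new_board
-- ===== SOURCE B (Python) =====
-- def move_northeast(new_board, row_copy, col_copy, previous_position, player):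
--     # Find the destination first: walk the northeast diagonal over empty
--     # squares, then perform the single clear-and-place update.
--     limit = min(row_copy, 3 - col_copy)
--     k = 0
--     while k < limit and new_board[row_copy - (k + 1)][col_copy + (k + 1)] is None:
--         k += 1
--     if k >= 1:
--         new_board[previous_position[0]][previous_position[1]] = None
--         new_board[row_copy - k][col_copy + k] = player
--     return new_board
-- ===== Notes on version B (the rewrite author's own statement) =====
-- stated objective: simpler
-- what changed: B first scans the diagonal once to find the destination square and then performs a single clear-source/place-piece update, instead of A's loop that re-places the piece and re-clears the trailing square on every step.
import Mathlib
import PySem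

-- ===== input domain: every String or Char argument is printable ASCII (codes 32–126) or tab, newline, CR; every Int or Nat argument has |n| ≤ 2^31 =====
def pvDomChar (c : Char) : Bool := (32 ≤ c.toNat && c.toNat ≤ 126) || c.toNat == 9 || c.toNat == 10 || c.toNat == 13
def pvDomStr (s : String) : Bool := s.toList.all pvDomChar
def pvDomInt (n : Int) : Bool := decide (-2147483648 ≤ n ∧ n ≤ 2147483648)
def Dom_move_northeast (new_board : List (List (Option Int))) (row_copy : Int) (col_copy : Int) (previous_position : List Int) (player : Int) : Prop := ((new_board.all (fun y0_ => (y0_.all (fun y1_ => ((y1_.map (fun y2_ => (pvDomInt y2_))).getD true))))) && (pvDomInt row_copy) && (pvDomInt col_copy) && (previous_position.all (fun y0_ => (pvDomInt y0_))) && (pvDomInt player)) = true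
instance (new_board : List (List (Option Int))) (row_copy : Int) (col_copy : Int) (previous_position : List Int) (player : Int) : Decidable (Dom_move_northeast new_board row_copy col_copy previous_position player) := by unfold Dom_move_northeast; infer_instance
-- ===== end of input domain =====

-- B finds the destination square with one read-only scan of the diagonal and then does a
-- single clear-source/place-piece update, instead of A's place-then-clear on every step (objective: simpler).

-- ===== PORT A =====
-- the for-loop of A: the list of n values, the mutating board and the rebound previous_position
def pvMoveALoop (row_copy col_copy player : Int) : List Int → List (List (Option Int)) → List Int → List (List (Option Int))
  | [], b, _ => b
  | n :: rest, b, prev =>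
    if row_copy - n ≥ 0 ∧ col_copy + n < 4 then
      if PySem.List.pyGetD (PySem.List.pyGetD b (row_copy - n) []) (col_copy + n) none ≠ none then b
      else
        let b1 := PySem.List.pySetD b (row_copy - n) (PySem.List.pySetD (PySem.List.pyGetD b (row_copy - n) []) (col_copy + n) (some player))
        let p0 := PySem.List.pyGetD prev 0 0
        let p1 := PySem.List.pyGetD prev 1 0
        let b2 := PySem.List.pySetD b1 p0 (PySem.List.pySetD (PySem.List.pyGetD b1 p0 []) p1 none)
        pvMoveALoop row_copy col_copy player rest b2 [row_copy - n, col_copy + n]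
    else pvMoveALoop row_copy col_copy player rest b prev

def move_northeast (new_board : List (List (Option Int))) (row_copy : Int) (col_copy : Int) (previous_position : List Int) (player : Int) : List (List (Option Int)) :=
  pvMoveALoop row_copy col_copy player (PySem.List.pyRange 1 (min (row_copy + 1) (4 - col_copy) + 1) 1) new_board previous_position

-- ===== PORT B =====
-- the while-loop of B: fuel = how many k < limit checks remain, k = steps taken so far
def pvScanNE (b : List (List (Option Int))) (row col : Int) : Nat → Nat → Nat
  | 0, k => k
  | fuel + 1, k =>
    if PySem.List.pyGetD (PySem.List.pyGetD b (row - ((k : Int) + 1)) []) (col + ((k : Int) + 1)) none = none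
    then pvScanNE b row col fuel (k + 1) else k

def move_northeast_alt (new_board : List (List (Option Int))) (row_copy : Int) (col_copy : Int) (previous_position : List Int) (player : Int) : List (List (Option Int)) :=
  let limit := min row_copy (3 - col_copy)
  let k : Int := (pvScanNE new_board row_copy col_copy limit.toNat 0 : Int)
  if 1 ≤ k then
    let p0 := PySem.List.pyGetD previous_position 0 0
    let p1 := PySem.List.pyGetD previous_position 1 0
    let b1 := PySem.List.pySetD new_board p0 (PySem.List.pySetD (PySem.List.pyGetD new_board p0 []) p1 none)
    PySem.List.pySetD b1 (row_copy - k) (PySem.List.pySetD (PySem.List.pyGetD b1 (row_copy - k) []) (col_copy + k) (some player))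
  else new_board

-- ===== PRECONDITION & SPEC =====
-- the diagonal square n steps northeast of (row_copy, col_copy), as A reads it
def pvDiag (b : List (List (Option Int))) (r c n : Int) : Option Int :=
  PySem.List.pyGetD (PySem.List.pyGetD b (r - n) []) (c + n) none

-- Pre_ excludes the inputs on which A raises IndexError, the inputs whose executed reads/writes
-- use a negative index (Python wraparound, which the ports do not model), and the inputs whose
-- previous_position lies on the open northeast diagonal, where A's in-place write order makes the
-- result an accident of mutation order.
def Pre_move_northeast (new_board : List (List (Option Int))) (row_copy : Int) (col_copy : Int) (previous_position : List Int) (player : Int) : Prop :=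
  min row_copy (3 - col_copy) ≤ 0 ∨
  ( row_copy - 1 < new_board.length ∧ 0 ≤ col_copy + 1 ∧
    col_copy + 1 < (PySem.List.pyGetD new_board (row_copy - 1) []).length ∧
    ( pvDiag new_board row_copy col_copy 1 = none →
      ( 2 ≤ previous_position.length ∧
        0 ≤ PySem.List.pyGetD previous_position 0 0 ∧
        PySem.List.pyGetD previous_position 0 0 < new_board.length ∧
        0 ≤ PySem.List.pyGetD previous_position 1 0 ∧
        PySem.List.pyGetD previous_position 1 0 < (PySem.List.pyGetD new_board (PySem.List.pyGetD previous_position 0 0) []).length ∧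
        ¬ (row_copy - PySem.List.pyGetD previous_position 0 0 = PySem.List.pyGetD previous_position 1 0 - col_copy ∧ PySem.List.pyGetD previous_position 0 0 < row_copy) ∧
        ∀ n ∈ PySem.List.pyRange 2 (min (min row_copy (3 - col_copy)) (new_board.length : Int) + 1) 1,
          (∀ m ∈ PySem.List.pyRange 1 n 1, pvDiag new_board row_copy col_copy m = none) →
          col_copy + n < (PySem.List.pyGetD new_board (row_copy - n) []).length ) ) )

instance (new_board : List (List (Option Int))) (row_copy : Int) (col_copy : Int) (previous_position : List Int) (player : Int) : Decidable (Pre_move_northeast new_board row_copy col_copy previous_position player) := by unfold Pre_move_northeast; infer_instance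

def pvWitness_move_northeast : List (List (Option Int)) × Int × Int × List Int × Int :=
  ([[none, none, none, none], [none, none, none, none], [none, none, none, none], [some 1, none, none, none]], 3, 0, [3, 0], 1)

def Spec_move_northeast (new_board : List (List (Option Int))) (row_copy : Int) (col_copy : Int) (previous_position : List Int) (player : Int) (out : List (List (Option Int))) : Prop := out = move_northeast_alt new_board row_copy col_copy previous_position player
instance (new_board : List (List (Option Int))) (row_copy : Int) (col_copy : Int) (previous_position : List Int) (player : Int) (out : List (List (Option Int))) : Decidable (Spec_move_northeast new_board row_copy col_copy previous_position player out) := by unfold Spec_move_northeast; infer_instance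

-- ===== CLAIM (what is proved, stated in full; the proofs are below) =====
def Claim_equal_move_northeast : Prop := ∀ (new_board : List (List (Option Int))) (row_copy : Int) (col_copy : Int) (previous_position : List Int) (player : Int), Dom_move_northeast new_board row_copy col_copy previous_position player → Pre_move_northeast new_board row_copy col_copy previous_position player → Spec_move_northeast new_board row_copy col_copy previous_position player (move_northeast new_board row_copy col_copy previous_position player)

-- ===== LEMMAS AND PROOFS =====

-- ---- 2D board helpers (proof-only) ----
def pvRow (b : List (List (Option Int))) (i : Nat) : List (Option Int) := b.getD i []
def pvGet2 (b : List (List (Option Int))) (i j : Nat) : Option Int := (pvRow b i).getD j none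
def pvSet2 (b : List (List (Option Int))) (i j : Nat) (v : Option Int) : List (List (Option Int)) := b.set i ((pvRow b i).set j v)

theorem length_pvSet2 (b : List (List (Option Int))) (i j : Nat) (v : Option Int) :
    (pvSet2 b i j v).length = b.length := by simp [pvSet2]

theorem pvRow_pvSet2_self (b : List (List (Option Int))) (i j : Nat) (v : Option Int)
    (h : i < b.length) : pvRow (pvSet2 b i j v) i = (pvRow b i).set j v := by
  simp [pvSet2, pvRow, List.getD_eq_getElem?_getD, h]

theorem pvRow_pvSet2_ne (b : List (List (Option Int))) (i i' j : Nat) (v : Option Int)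
    (h : i' ≠ i) : pvRow (pvSet2 b i j v) i' = pvRow b i' := by
  simp [pvSet2, pvRow, List.getD_eq_getElem?_getD, List.getElem?_set_ne (Ne.symm h)]

theorem pvSet2_oob (b : List (List (Option Int))) (i j : Nat) (v : Option Int)
    (h : b.length ≤ i) : pvSet2 b i j v = b := by
  simp [pvSet2, List.set_eq_of_length_le h]

theorem pvSet2_pvSet2_same (b : List (List (Option Int))) (i j : Nat) (v w : Option Int) :
    pvSet2 (pvSet2 b i j v) i j w = pvSet2 b i j w := by
  by_cases h : i < b.length
  · calc pvSet2 (pvSet2 b i j v) i j w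
        = (b.set i ((pvRow b i).set j v)).set i (((pvRow b i).set j v).set j w) := by
          show (pvSet2 b i j v).set i ((pvRow (pvSet2 b i j v) i).set j w) = _
          rw [pvRow_pvSet2_self b i j v h]; rfl
      _ = b.set i ((pvRow b i).set j w) := by rw [List.set_set, List.set_set]
      _ = pvSet2 b i j w := rfl
  · rw [pvSet2_oob b i j v (by omega)]

theorem pvSet2_comm (b : List (List (Option Int))) (i j i' j' : Nat) (v w : Option Int)
    (hne : i ≠ i' ∨ j ≠ j') :
    pvSet2 (pvSet2 b i j v) i' j' w = pvSet2 (pvSet2 b i' j' w) i j v := by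
  by_cases hi : i = i'
  · subst hi
    rcases hne with h | h
    · exact absurd rfl h
    · by_cases hlen : i < b.length
      · calc pvSet2 (pvSet2 b i j v) i j' w
            = (b.set i ((pvRow b i).set j v)).set i (((pvRow b i).set j v).set j' w) := by
              show (pvSet2 b i j v).set i ((pvRow (pvSet2 b i j v) i).set j' w) = _
              rw [pvRow_pvSet2_self b i j v hlen]; rfl
          _ = b.set i (((pvRow b i).set j' w).set j v) := by
              rw [List.set_set, List.set_comm _ _ h]
          _ = (b.set i ((pvRow b i).set j' w)).set i (((pvRow b i).set j' w).set j v) := by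
              rw [List.set_set]
          _ = pvSet2 (pvSet2 b i j' w) i j v := by
              show _ = (pvSet2 b i j' w).set i ((pvRow (pvSet2 b i j' w) i).set j v)
              rw [pvRow_pvSet2_self b i j' w hlen]; rfl
      · rw [pvSet2_oob b i j v (by omega), pvSet2_oob b i j' w (by omega),
            pvSet2_oob b i j v (by omega)]
  · calc pvSet2 (pvSet2 b i j v) i' j' w
        = (b.set i ((pvRow b i).set j v)).set i' ((pvRow b i').set j' w) := by
          show (pvSet2 b i j v).set i' ((pvRow (pvSet2 b i j v) i').set j' w) = _
          rw [pvRow_pvSet2_ne b i i' j v (Ne.symm hi)]; rfl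
      _ = (b.set i' ((pvRow b i').set j' w)).set i ((pvRow b i).set j v) := by
          rw [List.set_comm _ _ hi]
      _ = pvSet2 (pvSet2 b i' j' w) i j v := by
          show _ = (pvSet2 b i' j' w).set i ((pvRow (pvSet2 b i' j' w) i).set j v)
          rw [pvRow_pvSet2_ne b i' i j' w hi]; rfl

theorem pvSet2_noop (b : List (List (Option Int))) (i j : Nat) (v : Option Int)
    (hi : i < b.length) (hj : j < (pvRow b i).length) (hv : pvGet2 b i j = v) :
    pvSet2 b i j v = b := by
  have hrow : (pvRow b i).set j v = pvRow b i := by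
    subst hv
    simp [pvGet2, List.getD_eq_getElem?_getD, List.getElem?_eq_getElem hj,
      List.set_getElem_self]
  unfold pvSet2
  rw [hrow]
  simp [pvRow, List.getD_eq_getElem?_getD, List.getElem?_eq_getElem hi,
    List.set_getElem_self]

theorem pvGet2_pvSet2_ne (b : List (List (Option Int))) (i j i' j' : Nat) (v : Option Int)
    (hne : i' ≠ i ∨ j' ≠ j) : pvGet2 (pvSet2 b i j v) i' j' = pvGet2 b i' j' := by
  by_cases hi : i' = i
  · subst hi
    rcases hne with h | h
    · exact absurd rfl h
    · by_cases hlen : i' < b.length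
      · simp [pvGet2, pvRow_pvSet2_self b i' j v hlen, List.getD_eq_getElem?_getD,
          List.getElem?_set_ne (Ne.symm h)]
      · rw [pvSet2_oob b i' j v (by omega)]
  · simp [pvGet2, pvRow_pvSet2_ne b i i' j v hi]

-- ---- bridges: PySem Int indexing vs Nat indexing ----
theorem pyGetD_toNat {α : Type} (xs : List α) (i : Int) (d : α) (h : 0 ≤ i) :
    PySem.List.pyGetD xs i d = xs.getD i.toNat d := by
  conv_lhs => rw [show i = ((i.toNat : Nat) : Int) by omega]
  exact PySem.List.pyGetD_natCast xs i.toNat d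

theorem pyWrite_eq_pvSet2 (b : List (List (Option Int))) (i j : Int) (v : Option Int)
    (hi : 0 ≤ i) (hj : 0 ≤ j) :
    PySem.List.pySetD b i (PySem.List.pySetD (PySem.List.pyGetD b i []) j v)
      = pvSet2 b i.toNat j.toNat v := by
  rw [PySem.List.pySetD_of_nonneg _ _ hj, PySem.List.pySetD_of_nonneg _ _ hi,
    pyGetD_toNat _ _ _ hi]
  rfl

theorem pvDiag_eq_pvGet2 (b : List (List (Option Int))) (r c n : Int)
    (h1 : 0 ≤ r - n) (h2 : 0 ≤ c + n) :
    pvDiag b r c n = pvGet2 b (r - n).toNat (c + n).toNat := by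
  unfold pvDiag pvGet2 pvRow
  rw [pyGetD_toNat _ _ _ h1, pyGetD_toNat _ _ _ h2]

theorem pvWitness_ok : Dom_move_northeast (pvWitness_move_northeast.1) (pvWitness_move_northeast.2.1) (pvWitness_move_northeast.2.2.1) (pvWitness_move_northeast.2.2.2.1) (pvWitness_move_northeast.2.2.2.2) ∧ Pre_move_northeast (pvWitness_move_northeast.1) (pvWitness_move_northeast.2.1) (pvWitness_move_northeast.2.2.1) (pvWitness_move_northeast.2.2.2.1) (pvWitness_move_northeast.2.2.2.2) := by
  constructor <;> decide

theorem length_pvRow_pvSet2 (b : List (List (Option Int))) (i i' j : Nat) (v : Option Int) :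
    (pvRow (pvSet2 b i j v) i').length = (pvRow b i').length := by
  by_cases hi : i' = i
  · subst hi
    by_cases hlen : i' < b.length
    · rw [pvRow_pvSet2_self b i' j v hlen, List.length_set]
    · rw [pvSet2_oob b i' j v (by omega)]
  · rw [pvRow_pvSet2_ne b i i' j v hi]

theorem pvMinShift (r c : Int) : min (r + 1) (4 - c) = min r (3 - c) + 1 := by
  rcases le_total r (3 - c) with h | h
  · rw [min_eq_left (by omega), min_eq_left h]
  · rw [min_eq_right (by omega), min_eq_right h]; ring

-- the while-scan of B: result bounds, all skipped squares empty, the stopping square occupied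
theorem pvScanNE_spec (b : List (List (Option Int))) (r c : Int) :
    ∀ (fuel k : Nat),
      k ≤ pvScanNE b r c fuel k ∧
      pvScanNE b r c fuel k ≤ k + fuel ∧
      (∀ i : Nat, k < i → i ≤ pvScanNE b r c fuel k → pvDiag b r c (i : Int) = none) ∧
      (pvScanNE b r c fuel k < k + fuel → pvDiag b r c ((pvScanNE b r c fuel k : Int) + 1) ≠ none) := by
  intro fuel
  induction fuel with
  | zero =>
    intro k
    refine ⟨le_refl _, by simp [pvScanNE], ?_, by simp [pvScanNE]⟩
    intro i h1 h2
    simp only [pvScanNE] at h2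
    omega
  | succ f ih =>
    intro k
    by_cases hc : PySem.List.pyGetD (PySem.List.pyGetD b (r - ((k : Int) + 1)) []) (c + ((k : Int) + 1)) none = none
    · have hrec : pvScanNE b r c (f + 1) k = pvScanNE b r c f (k + 1) := by
        simp [pvScanNE, hc]
      obtain ⟨ih1, ih2, ih3, ih4⟩ := ih (k + 1)
      refine ⟨?_, ?_, ?_, ?_⟩ <;> rw [hrec]
      · omega
      · omega
      · intro i h1 h2
        by_cases hik : i = k + 1
        · subst hik
          have hcast : (((k + 1 : Nat)) : Int) = (k : Int) + 1 := by push_cast; ring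
          rw [hcast]
          exact hc
        · exact ih3 i (by omega) h2
      · intro h
        exact ih4 (by omega)
    · have hrec : pvScanNE b r c (f + 1) k = k := by
        simp [pvScanNE, hc]
      refine ⟨by rw [hrec], by rw [hrec]; omega, ?_, ?_⟩
      · intro i h1 h2
        rw [hrec] at h2
        omega
      · intro _
        rw [hrec]
        exact hc

theorem pyGetD_pair0 (x y d : Int) : PySem.List.pyGetD [x, y] 0 d = x :=
  PySem.List.pyGetD_zero_cons x [y] d

theorem pyGetD_pair1 (x y d : Int) : PySem.List.pyGetD [x, y] 1 d = y := by
  rw [pyGetD_toNat _ _ _ (by omega)]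
  rfl

-- A's loop, started at step s with the board/prev state A has built so far, lands the piece on square K
theorem pvLoopA_main (b : List (List (Option Int))) (r c : Int) (prev : List Int) (player : Int)
    (p0 p1 M : Int)
    (hMdef : M = min r (3 - c))
    (hp0def : p0 = PySem.List.pyGetD prev 0 0) (hp1def : p1 = PySem.List.pyGetD prev 1 0)
    (hp0 : 0 ≤ p0) (hp0L : p0 < (b.length : Int)) (hp1 : 0 ≤ p1)
    (_hp1L : p1 < ((PySem.List.pyGetD b p0 []).length : Int))
    (hoff : ¬ (r - p0 = p1 - c ∧ p0 < r))
    (hM1 : 1 ≤ M) (hrL : r - 1 < (b.length : Int)) (hc0 : 0 ≤ c + 1)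
    (hlen : ∀ n : Int, 1 ≤ n → n ≤ M → (∀ m : Int, 1 ≤ m → m < n → pvDiag b r c m = none) →
      c + n < ((PySem.List.pyGetD b (r - n) []).length : Int))
    (K : Nat) (hK1 : 1 ≤ K) (hKM : (K : Int) ≤ M)
    (hKnone : ∀ i : Nat, 1 ≤ i → i ≤ K → pvDiag b r c (i : Int) = none)
    (hKstop : (K : Int) < M → pvDiag b r c ((K : Int) + 1) ≠ none) :
    ∀ (j : Nat) (s : Int), 1 ≤ s → s + (j : Int) = M + 1 →
      (∀ m : Int, 1 ≤ m → m < s → pvDiag b r c m = none) →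
      pvMoveALoop r c player (PySem.List.pyRange s (M + 2) 1)
        (if s = 1 then b else pvSet2 (pvSet2 b p0.toNat p1.toNat none) (r - (s - 1)).toNat (c + (s - 1)).toNat (some player))
        (if s = 1 then prev else [r - (s - 1), c + (s - 1)])
      = pvSet2 (pvSet2 b p0.toNat p1.toNat none) (r - (K : Int)).toNat (c + (K : Int)).toNat (some player) := by
  have hMr : M ≤ r := hMdef ▸ min_le_left _ _
  have hMc : M ≤ 3 - c := hMdef ▸ min_le_right _ _
  intro j
  induction j with
  | zero =>
    intro s hs1 hsum hscan
    have hs : s = M + 1 := by omega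
    subst hs
    rw [PySem.List.pyRange_one_cons (by omega : M + 1 < M + 2),
      show M + 1 + 1 = M + 2 by ring, PySem.List.pyRange_one_eq_nil (le_refl (M + 2))]
    simp only [pvMoveALoop]
    rw [if_neg (by
      rintro ⟨hg1, hg2⟩
      have : M + 1 ≤ min r (3 - c) := le_min (by omega) (by omega)
      omega)]
    have hKeq : (K : Int) = M := by
      by_contra hne
      have hlt : (K : Int) < M := by omega
      exact (hKstop hlt) (hscan ((K : Int) + 1) (by omega) (by omega))
    rw [if_neg (by omega : ¬ (M + 1 = 1))]
    rw [show M + 1 - 1 = (K : Int) by omega]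
  | succ f ih =>
    intro s hs1 hsum hscan
    have hsM : s ≤ M := by
      have : ((f + 1 : Nat) : Int) = (f : Int) + 1 := by push_cast; ring
      omega
    rw [PySem.List.pyRange_one_cons (by omega : s < M + 2)]
    simp only [pvMoveALoop]
    rw [if_pos (⟨by omega, by omega⟩ : r - s ≥ 0 ∧ c + s < 4)]
    -- the square A reads at step s is the untouched original square
    have hoffs : ∀ t : Int, 1 ≤ t → t ≤ r → (r - t).toNat ≠ p0.toNat ∨ (c + t).toNat ≠ p1.toNat := by
      intro t ht ht2
      by_cases hpp : p0.toNat = (r - t).toNat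
      · right
        intro hq
        exact hoff ⟨by omega, by omega⟩
      · left
        omega
    have hread : PySem.List.pyGetD (PySem.List.pyGetD
        (if s = 1 then b else pvSet2 (pvSet2 b p0.toNat p1.toNat none) (r - (s - 1)).toNat (c + (s - 1)).toNat (some player)) (r - s) [])
        (c + s) none = pvDiag b r c s := by
      by_cases hs1' : s = 1
      · rw [if_pos hs1']
        rfl
      · rw [if_neg hs1']
        have h0 : (0 : Int) ≤ r - s := by omega
        have h0' : (0 : Int) ≤ c + s := by omega
        have e1 : PySem.List.pyGetD (PySem.List.pyGetD
            (pvSet2 (pvSet2 b p0.toNat p1.toNat none) (r - (s - 1)).toNat (c + (s - 1)).toNat (some player)) (r - s) [])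
            (c + s) none = pvGet2 (pvSet2 (pvSet2 b p0.toNat p1.toNat none) (r - (s - 1)).toNat (c + (s - 1)).toNat (some player)) (r - s).toNat (c + s).toNat :=
          pvDiag_eq_pvGet2 _ r c s h0 h0'
        rw [e1, pvGet2_pvSet2_ne _ _ _ _ _ _ (Or.inl (by omega)),
          pvGet2_pvSet2_ne _ _ _ _ _ _ (hoffs s (by omega) (by omega)),
          ← pvDiag_eq_pvGet2 b r c s h0 h0']
    by_cases hcell : pvDiag b r c s = none
    · rw [hread, if_neg (by simp [hcell])]
      -- the two in-place writes of step s
      have hb1 : PySem.List.pySetD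
          (if s = 1 then b else pvSet2 (pvSet2 b p0.toNat p1.toNat none) (r - (s - 1)).toNat (c + (s - 1)).toNat (some player)) (r - s)
          (PySem.List.pySetD (PySem.List.pyGetD
            (if s = 1 then b else pvSet2 (pvSet2 b p0.toNat p1.toNat none) (r - (s - 1)).toNat (c + (s - 1)).toNat (some player)) (r - s) [])
            (c + s) (some player))
          = pvSet2 (if s = 1 then b else pvSet2 (pvSet2 b p0.toNat p1.toNat none) (r - (s - 1)).toNat (c + (s - 1)).toNat (some player)) (r - s).toNat (c + s).toNat (some player) :=
        pyWrite_eq_pvSet2 _ _ _ _ (by omega) (by omega)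
      rw [hb1]
      have hfin := ih (s + 1) (by omega) (by push_cast at hsum ⊢; omega)
        (by
          intro m hm1 hm2
          by_cases hms : m = s
          · exact hms ▸ hcell
          · exact hscan m hm1 (by omega))
      rw [if_neg (by omega : ¬ (s + 1 = 1)), if_neg (by omega : ¬ (s + 1 = 1)), show s + 1 - 1 = s by ring] at hfin
      by_cases hs1' : s = 1
      · rw [if_pos hs1', if_pos hs1', ← hp0def, ← hp1def,
          pyWrite_eq_pvSet2 _ _ _ _ hp0 hp1,
          pvSet2_comm b (r - s).toNat (c + s).toNat p0.toNat p1.toNat (some player) none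
            (hoffs s (by omega) (by omega))]
        exact hfin
      · rw [if_neg hs1', if_neg hs1', pyGetD_pair0, pyGetD_pair1,
          pyWrite_eq_pvSet2 _ _ _ _ (by omega) (by omega),
          pvSet2_comm _ (r - s).toNat (c + s).toNat (r - (s - 1)).toNat (c + (s - 1)).toNat
            (some player) none (Or.inl (by omega)),
          pvSet2_pvSet2_same]
        have hv : pvGet2 (pvSet2 b p0.toNat p1.toNat none) (r - (s - 1)).toNat (c + (s - 1)).toNat = none := by
          rw [pvGet2_pvSet2_ne _ _ _ _ _ _ (hoffs (s - 1) (by omega) (by omega)),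
            ← pvDiag_eq_pvGet2 b r c (s - 1) (by omega) (by omega)]
          exact hscan (s - 1) (by omega) (by omega)
        have hj : (c + (s - 1)).toNat < (pvRow (pvSet2 b p0.toNat p1.toNat none) (r - (s - 1)).toNat).length := by
          rw [length_pvRow_pvSet2]
          have hlen' := hlen (s - 1) (by omega) (by omega)
            (fun m h1 h2 => hscan m h1 (by omega))
          have e : PySem.List.pyGetD b (r - (s - 1)) [] = pvRow b (r - (s - 1)).toNat := by
            rw [pyGetD_toNat _ _ _ (by omega)]
            rfl
          rw [e] at hlen'
          omega
        rw [pvSet2_noop _ _ _ _ (by rw [length_pvSet2]; omega) hj hv]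
        exact hfin
    · rw [hread, if_pos (by simp [hcell])]
      have hKs : (K : Int) = s - 1 := by
        rcases lt_trichotomy (K : Int) (s - 1) with hlt | heq | hgt
        · exfalso
          have hKM' : (K : Int) < M := by omega
          exact (hKstop hKM') (hscan ((K : Int) + 1) (by omega) (by omega))
        · exact heq
        · exfalso
          have h1s : 1 ≤ s.toNat := by omega
          have h2s : s.toNat ≤ K := by omega
          have := hKnone s.toNat h1s h2s
          rw [show ((s.toNat : Nat) : Int) = s by omega] at this
          exact hcell (by rw [← this])
      have hs2 : ¬ (s = 1) := by omega
      rw [if_neg hs2, show s - 1 = (K : Int) by omega]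

-- ===== VERDICT (by name: the statement is the Claim_ definition above) =====
theorem move_northeast_spec : Claim_equal_move_northeast := by
  intro b r c prev player _hDom hPre
  unfold Spec_move_northeast
  by_cases hM : min r (3 - c) ≤ 0
  · have hA : move_northeast b r c prev player = b := by
      unfold move_northeast
      rw [pvMinShift]
      by_cases hM' : min r (3 - c) + 1 + 1 ≤ 1
      · rw [PySem.List.pyRange_one_eq_nil (by omega)]
        simp only [pvMoveALoop]
      · rw [PySem.List.pyRange_one_cons (by omega : (1 : Int) < min r (3 - c) + 1 + 1),
          PySem.List.pyRange_one_eq_nil (by omega)]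
        simp only [pvMoveALoop]
        rw [if_neg (by
          rintro ⟨hg1, hg2⟩
          have : (1 : Int) ≤ min r (3 - c) := le_min (by omega) (by omega)
          omega)]
    have hB : move_northeast_alt b r c prev player = b := by
      simp only [move_northeast_alt]
      rw [Int.toNat_of_nonpos hM]
      simp [pvScanNE]
    rw [hA, hB]
  · have hM1 : (1 : Int) ≤ min r (3 - c) := by omega
    have h1r : (1 : Int) ≤ r := le_trans hM1 (min_le_left _ _)
    have h1c : (1 : Int) ≤ 3 - c := le_trans hM1 (min_le_right _ _)
    rcases hPre with h | ⟨hrL, hc0, hc1len, himp⟩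
    · omega
    by_cases h1 : pvDiag b r c 1 = none
    case neg =>
      have hA : move_northeast b r c prev player = b := by
        unfold move_northeast
        rw [pvMinShift, PySem.List.pyRange_one_cons (by omega : (1 : Int) < min r (3 - c) + 1 + 1)]
        simp only [pvMoveALoop]
        rw [if_pos (⟨by omega, by omega⟩ : r - 1 ≥ 0 ∧ c + 1 < 4), if_pos (show PySem.List.pyGetD (PySem.List.pyGetD b (r - 1) []) (c + 1) none ≠ none from h1)]
      have hscan0 : pvScanNE b r c (min r (3 - c)).toNat 0 = 0 := by
        conv_lhs => rw [show (min r (3 - c)).toNat = ((min r (3 - c)).toNat - 1) + 1 by omega]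
        simp only [pvScanNE, Nat.cast_zero, zero_add]
        rw [if_neg (show ¬ PySem.List.pyGetD (PySem.List.pyGetD b (r - 1) []) (c + 1) none = none from h1)]
      have hB : move_northeast_alt b r c prev player = b := by
        simp only [move_northeast_alt]
        simp [hscan0]
      rw [hA, hB]
    case pos =>
      obtain ⟨hplen, hp0, hp0L, hp1, hp1L, hoff, hq⟩ := himp h1
      have hlen : ∀ n : Int, 1 ≤ n → n ≤ min r (3 - c) →
          (∀ m : Int, 1 ≤ m → m < n → pvDiag b r c m = none) →
          c + n < ((PySem.List.pyGetD b (r - n) []).length : Int) := by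
        intro n hn1 hnM hpref
        by_cases hn : n = 1
        · subst hn; exact hc1len
        · refine hq n ?_ ?_
          · rw [PySem.List.mem_pyRange_one]
            have h2n : (2 : Int) ≤ n := by omega
            have hnm : n ≤ min (min r (3 - c)) (b.length : Int) :=
              le_min hnM (by omega)
            exact ⟨h2n, by omega⟩
          · intro m hmmem
            rw [PySem.List.mem_pyRange_one] at hmmem
            exact hpref m hmmem.1 hmmem.2
      obtain ⟨K, hKdef⟩ : ∃ k : Nat, pvScanNE b r c (min r (3 - c)).toNat 0 = k := ⟨_, rfl⟩
      obtain ⟨hsp1, hsp2, hsp3, hsp4⟩ := pvScanNE_spec b r c (min r (3 - c)).toNat 0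
      rw [hKdef] at hsp1 hsp2 hsp3 hsp4
      have hK1 : 1 ≤ K := by
        have e : (min r (3 - c)).toNat = ((min r (3 - c)).toNat - 1) + 1 := by omega
        have hstep : pvScanNE b r c (min r (3 - c)).toNat 0 = pvScanNE b r c ((min r (3 - c)).toNat - 1) 1 := by
          conv_lhs => rw [e]
          simp only [pvScanNE, Nat.cast_zero, zero_add]
          rw [if_pos (show PySem.List.pyGetD (PySem.List.pyGetD b (r - 1) []) (c + 1) none = none from h1)]
        have := (pvScanNE_spec b r c ((min r (3 - c)).toNat - 1) 1).1
        omega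
      have hKM : (K : Int) ≤ min r (3 - c) := by omega
      have hKnone : ∀ i : Nat, 1 ≤ i → i ≤ K → pvDiag b r c (i : Int) = none :=
        fun i a bnd => hsp3 i (by omega) bnd
      have hKstop : (K : Int) < min r (3 - c) → pvDiag b r c ((K : Int) + 1) ≠ none := by
        intro h
        exact hsp4 (by omega)
      have hA : move_northeast b r c prev player
          = pvSet2 (pvSet2 b (PySem.List.pyGetD prev 0 0).toNat (PySem.List.pyGetD prev 1 0).toNat none)
              (r - (K : Int)).toNat (c + (K : Int)).toNat (some player) := by
        unfold move_northeast
        rw [pvMinShift]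
        have happ := pvLoopA_main b r c prev player
          (PySem.List.pyGetD prev 0 0) (PySem.List.pyGetD prev 1 0) (min r (3 - c))
          rfl rfl rfl hp0 hp0L hp1 hp1L hoff hM1 hrL hc0 hlen K hK1 hKM hKnone hKstop
          (min r (3 - c)).toNat 1 (by omega) (by omega) (by intro m hm1 hm2; omega)
        rw [if_pos rfl, if_pos rfl] at happ
        rw [show min r (3 - c) + 1 + 1 = min r (3 - c) + 2 by ring]
        exact happ
      have hB : move_northeast_alt b r c prev player
          = pvSet2 (pvSet2 b (PySem.List.pyGetD prev 0 0).toNat (PySem.List.pyGetD prev 1 0).toNat none)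
              (r - (K : Int)).toNat (c + (K : Int)).toNat (some player) := by
        simp only [move_northeast_alt, hKdef]
        rw [if_pos (by exact_mod_cast hK1 : (1 : Int) ≤ (K : Int))]
        rw [pyWrite_eq_pvSet2 _ _ _ _ hp0 hp1,
          pyWrite_eq_pvSet2 _ _ _ _ (by omega) (by omega)]
      rw [hA, hB]
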